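-- pv_equiv track=rewrite | github.com/ksubowu/streamlit-mol-demo | det_engine.py | reorder_bond_bbox
-- ===== SOURCE A (Python) =====
-- def reorder_bond_bbox(bond_bbox, single_atom_bond):
--     # 分离普通索引和需要后置的索引
--     normal_indices = []
--     special_indices = []
--     # 获取需要后置的 key
--     keys_to_move = set(single_atom_bond.keys())
--     # 分类所有索引
--     for i in range(len(bond_bbox)):
--         if i in keys_to_move:
--             special_indices.append(i)
--         else:
--             normal_indices.append(i)
--     # 新顺序：普通索引在前，特殊索引在后
--     new_order = normal_indices + special_indices
--     # 重排 bond_bbox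
--     reordered_bbox = [bond_bbox[i] for i in new_order]
--     return reordered_bbox
-- ===== SOURCE B (Python) =====
-- def reorder_bond_bbox(bond_bbox, single_atom_bond):
--     keys_to_move = set(single_atom_bond)
--     pairs = sorted(enumerate(bond_bbox), key=lambda p: p[0] in keys_to_move)
--     return [bb for _, bb in pairs]
-- ===== Notes on version B (the rewrite author's own statement) =====
-- stated objective: simpler
-- what changed: Replaces the two-bucket index partition plus gather-by-index with a single stable sort of enumerate(bond_bbox) on the boolean key 'index is a single-atom-bond key', so normal rows precede special rows with original order preserved inside each group.
import Mathlib
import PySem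

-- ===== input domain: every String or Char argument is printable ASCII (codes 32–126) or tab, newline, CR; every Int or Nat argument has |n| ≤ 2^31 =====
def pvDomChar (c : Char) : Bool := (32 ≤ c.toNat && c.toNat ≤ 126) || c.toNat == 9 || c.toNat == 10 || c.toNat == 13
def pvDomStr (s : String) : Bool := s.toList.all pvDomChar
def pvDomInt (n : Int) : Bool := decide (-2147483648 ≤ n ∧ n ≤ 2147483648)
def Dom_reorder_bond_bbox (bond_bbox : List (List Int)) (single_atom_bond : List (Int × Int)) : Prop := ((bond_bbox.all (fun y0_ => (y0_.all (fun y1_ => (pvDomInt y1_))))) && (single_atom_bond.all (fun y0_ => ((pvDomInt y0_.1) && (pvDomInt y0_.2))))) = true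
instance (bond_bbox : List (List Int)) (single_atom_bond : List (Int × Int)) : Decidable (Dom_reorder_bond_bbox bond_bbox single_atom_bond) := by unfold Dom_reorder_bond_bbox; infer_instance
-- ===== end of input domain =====

-- B replaces A's two-bucket index partition + gather with one stable sort of
-- enumerate(bond_bbox) on the boolean key "index is a single_atom_bond key" (objective: simpler).

-- ===== PORT A =====
def reorder_bond_bbox (bond_bbox : List (List Int)) (single_atom_bond : List (Int × Int)) : List (List Int) :=
  let keys_to_move : PySem.Set Int := PySem.Set.ofList (single_atom_bond.map (·.1))
  let p := (PySem.List.pyRange 0 (PySem.List.len bond_bbox) 1).foldl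
    (fun (acc : List Int × List Int) i =>
      if PySem.Set.contains keys_to_move i then (acc.1, acc.2 ++ [i]) else (acc.1 ++ [i], acc.2))
    ([], [])
  let new_order := p.1 ++ p.2
  -- bond_bbox[i]: i always in range here, so the total pyGetD is exact
  new_order.map (fun i => PySem.List.pyGetD bond_bbox i [])

-- ===== PORT B =====
def reorder_bond_bbox_alt (bond_bbox : List (List Int)) (single_atom_bond : List (Int × Int)) : List (List Int) :=
  let keys_to_move : PySem.Set Int := PySem.Set.ofList (single_atom_bond.map (·.1))
  let pairs := PySem.List.sorted (PySem.List.enumerate bond_bbox 0)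
    (fun p => PySem.Set.contains keys_to_move p.1) false
  pairs.map (·.2)

-- ===== PRECONDITION & SPEC =====
def Spec_reorder_bond_bbox (bond_bbox : List (List Int)) (single_atom_bond : List (Int × Int)) (out : List (List Int)) : Prop := out = reorder_bond_bbox_alt bond_bbox single_atom_bond
instance (bond_bbox : List (List Int)) (single_atom_bond : List (Int × Int)) (out : List (List Int)) : Decidable (Spec_reorder_bond_bbox bond_bbox single_atom_bond out) := by unfold Spec_reorder_bond_bbox; infer_instance

-- ===== CLAIM (what is proved, stated in full; the proofs are below) =====
def Claim_equal_reorder_bond_bbox : Prop := ∀ (bond_bbox : List (List Int)) (single_atom_bond : List (Int × Int)), Dom_reorder_bond_bbox bond_bbox single_atom_bond → Spec_reorder_bond_bbox bond_bbox single_atom_bond (reorder_bond_bbox bond_bbox single_atom_bond)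

-- ===== LEMMAS AND PROOFS =====\n
-- A's classification loop appends each index to one of the two buckets: it computes the two filters.
theorem pvFoldlPartition {α : Type} (p : α → Bool) (l : List α) (ns ss : List α) :
    l.foldl (fun (acc : List α × List α) i =>
        if p i then (acc.1, acc.2 ++ [i]) else (acc.1 ++ [i], acc.2)) (ns, ss)
      = (ns ++ l.filter (fun i => !p i), ss ++ l.filter p) := by
  induction l generalizing ns ss with
  | nil => simp
  | cons x l ih =>
    by_cases h : p x = true <;> simp [List.foldl_cons, h, ih]

theorem pvInsertBy_true {α : Type} (key : α → Bool) (x : α) (l : List α) (hx : key x = true) :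
    PySem.List.insertBy (fun a b => decide (key a < key b)) x l = l ++ [x] := by
  apply PySem.List.insertBy_of_forall_not_before
  intro y _
  simp [hx]

theorem pvInsertBy_false {α : Type} (key : α → Bool) (x : α) (fs ts : List α)
    (hx : key x = false) (hfs : ∀ y ∈ fs, key y = false) (hts : ∀ y ∈ ts, key y = true) :
    PySem.List.insertBy (fun a b => decide (key a < key b)) x (fs ++ ts) = fs ++ x :: ts := by
  induction fs with
  | nil =>
    cases ts with
    | nil => simp [PySem.List.insertBy]
    | cons t ts =>
      have ht := hts t (by simp)
      simp [PySem.List.insertBy, hx, ht]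
  | cons f fs ih =>
    have hf := hfs f (by simp)
    simp [PySem.List.insertBy, hx, hf, ih (fun y hy => hfs y (by simp [hy]))]

-- stable sort on a boolean key = stable two-way partition
theorem pvSortedBoolKey {α : Type} (key : α → Bool) (l : List α) :
    PySem.List.sorted l key false = l.filter (fun x => !key x) ++ l.filter key := by
  rw [PySem.List.sorted_eq_foldl_insertBy]
  suffices h : ∀ (fs ts : List α), (∀ y ∈ fs, key y = false) → (∀ y ∈ ts, key y = true) →
      l.foldl (fun acc x => PySem.List.insertBy (fun a b => decide (key a < key b)) x acc) (fs ++ ts)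
        = (fs ++ l.filter (fun x => !key x)) ++ (ts ++ l.filter key) by
    simpa using h [] [] (by simp) (by simp)
  induction l with
  | nil => simp
  | cons x l ih =>
    intro fs ts hfs hts
    by_cases hx : key x = true
    · rw [List.foldl_cons, pvInsertBy_true key x (fs ++ ts) hx, List.append_assoc]
      have := ih fs (ts ++ [x]) hfs (by intro y hy; rcases List.mem_append.1 hy with h | h
                                        · exact hts y h
                                        · simp at h; simpa [h])
      simpa [hx] using this
    · have hx' : key x = false := by simpa using hx
      rw [List.foldl_cons, pvInsertBy_false key x fs ts hx' hfs hts]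
      have := ih (fs ++ [x]) ts (by intro y hy; rcases List.mem_append.1 hy with h | h
                                    · exact hfs y h
                                    · simp at h; simpa [h]) hts
      simpa [hx'] using this

-- ===== VERDICT (by name: the statement is the Claim_ definition above) =====
theorem reorder_bond_bbox_spec : Claim_equal_reorder_bond_bbox := by
  intro bond_bbox single_atom_bond _
  unfold Spec_reorder_bond_bbox reorder_bond_bbox reorder_bond_bbox_alt
  simp only [pvSortedBoolKey, pvFoldlPartition,
      PySem.List.enumerate_eq_map_pyRange bond_bbox ([] : List Int)]
  have hc : (PySem.Set.ofList (single_atom_bond.map (·.1))).contains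
      = fun x => decide (x ∈ PySem.Set.ofList (single_atom_bond.map (·.1))) := by
    funext x; exact List.contains_eq_mem x _
  simp [List.filter_map, Function.comp_def, hc]
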